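-- pv_equiv track=rewrite | github.com/geniusywj/gomoku | board_evaluation.py | count_continuous_x
-- ===== SOURCE A (Python) =====
-- from itertools import product
--
-- def count_continuous_x(board, player, x):
--     board_size = len(board)
--     offsets = ((0, 1), (1, 1), (1, 0), (1, -1))
--     count = 0
--     for i, j in product(range(board_size), range(board_size)):
--         if board[i][j] == player:
--             for offset in offsets:
--                 if not out_of_bound(board, i - offset[0], j - offset[1]) and \
--                         board[i - offset[0]][j - offset[1]] == player:
--                     continue
--                 legal = True
--                 for x_ in range(1, x):
--                     i_ = i + offset[0] * x_
--                     j_ = j + offset[1] * x_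
--                     if out_of_bound(board, i_, j_):
--                         legal = False
--                         break
--                     legal = legal and board[i_][j_] == player
--                 if not out_of_bound(board, i + offset[0] * x, j + offset[1] * x) and \
--                         board[i + offset[0] * x][j + offset[1] * x] == player:
--                     legal = False
--                 count += legal
--     return count
--
-- def out_of_bound(board, i, j):
--     return i >= len(board) or j >= len(board) or i < 0 or j < 0
-- ===== SOURCE B (Python) =====
-- def count_continuous_x(board, player, x):
--     n = len(board)
--     offsets = ((0, 1), (1, 1), (1, 0), (1, -1))
--     total = 0
--     for dy, dx in offsets:
--         # run[(i, j)] = number of consecutive player stones starting at (i, j) along (dy, dx)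
--         run = {}
--         for i in reversed(range(n)):
--             for j in (range(n) if dx < 0 else reversed(range(n))):
--                 if board[i][j] == player:
--                     run[(i, j)] = 1 + run.get((i + dy, j + dx), 0)
--         for i in range(n):
--             for j in range(n):
--                 if board[i][j] == player and run[(i, j)] == x and \
--                         not (0 <= i - dy < n and 0 <= j - dx < n and board[i - dy][j - dx] == player):
--                     total += 1
--     return total
-- ===== Notes on version B (the rewrite author's own statement) =====
-- stated objective: alternative
-- what changed: A re-scans up to x cells from every player cell in each of the 4 directions; B instead builds, per direction, a run-length table (run(i,j) = 1 + run(i+dy,j+dx)) in one pass over the board and then counts cells that start a maximal run of length exactly x.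
-- outside the precondition, e.g. on count_continuous_x([[1, 1], [0, 0]], 1, -1): A returns 7, B returns 0
import Mathlib
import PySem

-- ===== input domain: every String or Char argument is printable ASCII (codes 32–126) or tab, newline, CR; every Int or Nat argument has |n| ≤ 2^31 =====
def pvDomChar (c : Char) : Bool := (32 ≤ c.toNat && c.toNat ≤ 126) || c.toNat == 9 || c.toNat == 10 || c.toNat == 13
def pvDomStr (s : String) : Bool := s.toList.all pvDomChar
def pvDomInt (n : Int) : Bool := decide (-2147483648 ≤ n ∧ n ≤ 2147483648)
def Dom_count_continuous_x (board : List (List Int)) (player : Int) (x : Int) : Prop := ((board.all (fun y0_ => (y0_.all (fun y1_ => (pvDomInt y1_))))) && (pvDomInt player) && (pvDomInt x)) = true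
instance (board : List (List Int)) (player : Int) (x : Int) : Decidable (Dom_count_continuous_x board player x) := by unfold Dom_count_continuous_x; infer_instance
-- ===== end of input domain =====

-- B replaces A's per-cell re-scan of up to x cells with one run-length DP table per direction
-- (run(i,j) = 1 + run(i+dy,j+dx)), then counts run starts of length exactly x.

-- ===== PORT A =====

-- board[i][j]; every access in both programs is guarded to be in range (rows under Pre_), so the defaults never fire
def pvCell (board : List (List Int)) (i j : Int) : Int :=
  PySem.List.pyGetD (PySem.List.pyGetD board i []) j 0

def out_of_bound (board : List (List Int)) (i j : Int) : Bool :=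
  decide ((board.length : Int) ≤ i) || decide ((board.length : Int) ≤ j) || decide (i < 0) || decide (j < 0)

-- the body of A's offset loop after the 'continue' check: the range(1, x) scan with break, then the cell-after-run check
def pvLegalA (board : List (List Int)) (player x dy dx i j : Int) : Bool :=
  let st := (PySem.List.pyRange 1 x 1).foldl
    (fun (st : Bool × Bool) x_ =>
      if st.1 then st
      else
        let i_ := i + dy * x_
        let j_ := j + dx * x_
        if out_of_bound board i_ j_ then (true, false)
        else (st.1, st.2 && decide (pvCell board i_ j_ = player))) (false, true)
  if out_of_bound board (i + dy * x) (j + dx * x) = false ∧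
      pvCell board (i + dy * x) (j + dx * x) = player then false else st.2

def count_continuous_x (board : List (List Int)) (player : Int) (x : Int) : Int :=
  let board_size : Int := (board.length : Int)
  let offsets : List (Int × Int) := [(0, 1), (1, 1), (1, 0), (1, -1)]
  (PySem.List.pyRange 0 board_size 1).foldl (fun count i =>
    (PySem.List.pyRange 0 board_size 1).foldl (fun count j =>
      if pvCell board i j = player then
        offsets.foldl (fun count offset =>
          if out_of_bound board (i - offset.1) (j - offset.2) = false ∧
              pvCell board (i - offset.1) (j - offset.2) = player then count
          else count + (if pvLegalA board player x offset.1 offset.2 i j then 1 else 0)) count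
      else count) count) 0

-- ===== PORT B =====

def count_continuous_x_alt (board : List (List Int)) (player : Int) (x : Int) : Int :=
  let n : Int := (board.length : Int)
  let offsets : List (Int × Int) := [(0, 1), (1, 1), (1, 0), (1, -1)]
  offsets.foldl (fun total off =>
    let dy := off.1
    let dx := off.2
    let run : PySem.Dict (Int × Int) Int :=
      ((PySem.List.pyRange 0 n 1).reverse).foldl (fun run i =>
        (if dx < 0 then PySem.List.pyRange 0 n 1 else (PySem.List.pyRange 0 n 1).reverse).foldl
          (fun run j =>
            if pvCell board i j = player then
              run.insert (i, j) (1 + run.getD (i + dy, j + dx) 0)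
            else run) run) PySem.Dict.empty
    (PySem.List.pyRange 0 n 1).foldl (fun total i =>
      (PySem.List.pyRange 0 n 1).foldl (fun total j =>
        if pvCell board i j = player ∧ run.getD (i, j) 0 = x ∧
            ¬ (0 ≤ i - dy ∧ i - dy < n ∧ 0 ≤ j - dx ∧ j - dx < n ∧
               pvCell board (i - dy) (j - dx) = player)
        then total + 1 else total) total) total) 0

-- ===== PRECONDITION & SPEC =====
-- Pre_ excludes (a) boards with a row shorter than the board (A raises IndexError there), and
-- (b) negative x, outside the natural domain of 'count runs of length x': A returns an accidental
-- count there (it tests a cell BEHIND the start), B returns 0.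
def Pre_count_continuous_x (board : List (List Int)) (player : Int) (x : Int) : Prop :=
  (∀ row ∈ board, (board.length : Int) ≤ (row.length : Int)) ∧ 0 ≤ x

instance (board : List (List Int)) (player : Int) (x : Int) : Decidable (Pre_count_continuous_x board player x) := by
  unfold Pre_count_continuous_x; infer_instance

def pvWitness_count_continuous_x : List (List Int) × Int × Int := ([[1, 1], [0, 1]], 1, 2)

def Spec_count_continuous_x (board : List (List Int)) (player : Int) (x : Int) (out : Int) : Prop := out = count_continuous_x_alt board player x
instance (board : List (List Int)) (player : Int) (x : Int) (out : Int) : Decidable (Spec_count_continuous_x board player x out) := by unfold Spec_count_continuous_x; infer_instance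

-- ===== CLAIM (what is proved, stated in full; the proofs are below) =====
def Claim_equal_count_continuous_x : Prop := ∀ (board : List (List Int)) (player : Int) (x : Int), Dom_count_continuous_x board player x → Pre_count_continuous_x board player x → Spec_count_continuous_x board player x (count_continuous_x board player x)

-- ===== LEMMAS AND PROOFS =====

def pvCellP (board : List (List Int)) (player i j : Int) : Bool :=
  decide (0 ≤ i ∧ i < (board.length : Int) ∧ 0 ≤ j ∧ j < (board.length : Int)) &&
  decide (pvCell board i j = player)

lemma pvOob_false_iff (board : List (List Int)) (i j : Int) :
    out_of_bound board i j = false ↔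
      (0 ≤ i ∧ i < (board.length : Int) ∧ 0 ≤ j ∧ j < (board.length : Int)) := by
  simp [out_of_bound]; omega

lemma pvCellB_eq (board : List (List Int)) (player a b : Int) :
    (!out_of_bound board a b && decide (pvCell board a b = player)) = pvCellP board player a b := by
  simp only [out_of_bound, pvCellP]
  by_cases h1 : 0 ≤ a ∧ a < (board.length : Int) ∧ 0 ≤ b ∧ b < (board.length : Int)
  · simp [h1]
    all_goals omega
  · simp [h1]
    all_goals omega

lemma pvLoop_true (board : List (List Int)) (player dy dx i j : Int) :
    ∀ (L : List Int) (cb : Bool),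
      (L.foldl (fun (st : Bool × Bool) x_ =>
        if st.1 then st
        else
          if out_of_bound board (i + dy * x_) (j + dx * x_) then (true, false)
          else (st.1, st.2 && decide (pvCell board (i + dy * x_) (j + dx * x_) = player)))
        (true, cb)) = (true, cb) := by
  intro L
  induction L with
  | nil => intro cb; rfl
  | cons k t ih => intro cb; simpa using ih cb

lemma pvLoop_snd (board : List (List Int)) (player dy dx i j : Int) :
    ∀ (L : List Int) (cb : Bool),
      (L.foldl (fun (st : Bool × Bool) x_ =>
        if st.1 then st
        else
          if out_of_bound board (i + dy * x_) (j + dx * x_) then (true, false)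
          else (st.1, st.2 && decide (pvCell board (i + dy * x_) (j + dx * x_) = player)))
        (false, cb)).2 = (cb && L.all (fun x_ => pvCellP board player (i + dy * x_) (j + dx * x_))) := by
  intro L
  induction L with
  | nil => intro cb; simp
  | cons k t ih =>
    intro cb
    by_cases ho : out_of_bound board (i + dy * k) (j + dx * k) = true
    · have hcp : pvCellP board player (i + dy * k) (j + dx * k) = false := by
        rw [← pvCellB_eq]; simp [ho]
      simp only [List.foldl_cons, Bool.false_eq_true, if_false, ho, if_true]
      rw [pvLoop_true board player dy dx i j t false]
      simp [hcp]
    · have ho' : out_of_bound board (i + dy * k) (j + dx * k) = false := by simpa using ho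
      simp only [List.foldl_cons, Bool.false_eq_true, if_false, ho', List.all_cons]
      rw [ih]
      rw [← pvCellB_eq board player (i + dy * k) (j + dx * k)]
      simp [ho', Bool.and_assoc]

def pvRayF (board : List (List Int)) (player dy dx : Int) : Nat → Int → Int → Nat
  | 0, _, _ => 0
  | f + 1, i, j =>
      if pvCellP board player i j then pvRayF board player dy dx f (i + dy) (j + dx) + 1 else 0
def pvRay (board : List (List Int)) (player dy dx i j : Int) : Nat :=
  pvRayF board player dy dx (board.length + 1) i j


lemma pvRayF_stable (board : List (List Int)) (player dy dx : Int) (c : Int → Int → Int)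
    (hstep : ∀ i j, c (i + dy) (j + dx) = c i j + 1)
    (hlt : ∀ i j, pvCellP board player i j = true → c i j < (board.length : Int)) :
    ∀ (f1 f2 : Nat) (i j : Int),
      (board.length : Int) ≤ c i j + f1 → (board.length : Int) ≤ c i j + f2 →
      pvRayF board player dy dx f1 i j = pvRayF board player dy dx f2 i j := by
  intro f1
  induction f1 with
  | zero =>
    intro f2 i j h1 _
    cases f2 with
    | zero => rfl
    | succ g =>
      have hc : pvCellP board player i j = false := by
        by_contra h
        have := hlt i j (by simpa using h)
        omega
      simp [pvRayF, hc]
  | succ k ih =>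
    intro f2 i j h1 h2
    cases f2 with
    | zero =>
      have hc : pvCellP board player i j = false := by
        by_contra h
        have := hlt i j (by simpa using h)
        omega
      simp [pvRayF, hc]
    | succ g =>
      by_cases hc : pvCellP board player i j = true
      · simp only [pvRayF, hc, if_true]
        have := hstep i j
        have := ih g (i + dy) (j + dx) (by omega) (by omega)
        omega
      · simp [pvRayF, hc]

lemma pvRay_succ (board : List (List Int)) (player dy dx : Int) (c : Int → Int → Int)
    (hstep : ∀ i j, c (i + dy) (j + dx) = c i j + 1)
    (hlt : ∀ i j, pvCellP board player i j = true → c i j < (board.length : Int))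
    (hge : ∀ i j, pvCellP board player i j = true → 0 ≤ c i j) (i j : Int) :
    pvRay board player dy dx i j =
      if pvCellP board player i j then pvRay board player dy dx (i + dy) (j + dx) + 1 else 0 := by
  by_cases hc : pvCellP board player i j = true
  · have h0 := hge i j hc
    have hs := hstep i j
    have key : pvRayF board player dy dx (board.length + 1) i j =
        if pvCellP board player i j then
          pvRayF board player dy dx board.length (i + dy) (j + dx) + 1 else 0 := rfl
    have hst := pvRayF_stable board player dy dx c hstep hlt (board.length) (board.length + 1)
      (i + dy) (j + dx) (by push_cast; omega) (by push_cast; omega)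
    rw [pvRay, key]
    simp [hc, hst, pvRay]
  · simp [pvRay, pvRayF, hc]

lemma pvRay_ge_iff (board : List (List Int)) (player dy dx : Int) (c : Int → Int → Int)
    (hstep : ∀ i j, c (i + dy) (j + dx) = c i j + 1)
    (hlt : ∀ i j, pvCellP board player i j = true → c i j < (board.length : Int))
    (hge : ∀ i j, pvCellP board player i j = true → 0 ≤ c i j) :
    ∀ (m : Nat) (i j : Int),
      m ≤ pvRay board player dy dx i j ↔
        ∀ k : Nat, k < m → pvCellP board player (i + dy * k) (j + dx * k) = true := by
  intro m
  induction m with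
  | zero => intro i j; simp
  | succ m ih =>
    intro i j
    rw [pvRay_succ board player dy dx c hstep hlt hge i j]
    by_cases hc : pvCellP board player i j = true
    · simp only [hc, if_true]
      constructor
      · intro h k hk
        cases k with
        | zero => simpa using hc
        | succ k' =>
          have := (ih (i + dy) (j + dx)).mp (by omega) k' (by omega)
          have e1 : i + dy + dy * (k' : Int) = i + dy * ((k' : Nat) + 1 : Nat) := by push_cast; ring
          have e2 : j + dx + dx * (k' : Int) = j + dx * ((k' : Nat) + 1 : Nat) := by push_cast; ring
          rw [e1, e2] at this
          exact this
      · intro h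
        have : ∀ k : Nat, k < m → pvCellP board player (i + dy + dy * k) (j + dx + dx * k) = true := by
          intro k hk
          have := h (k + 1) (by omega)
          have e1 : i + dy * ((k : Nat) + 1 : Nat) = i + dy + dy * (k : Int) := by push_cast; ring
          have e2 : j + dx * ((k : Nat) + 1 : Nat) = j + dx + dx * (k : Int) := by push_cast; ring
          rw [e1, e2] at this
          exact this
        have := (ih (i + dy) (j + dx)).mpr this
        omega
    · have hc' : pvCellP board player i j = false := by simpa using hc
      rw [if_neg (by simp [hc'])]
      constructor
      · intro h; exact absurd h (by omega)
      · intro h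
        exfalso
        have := h 0 (by omega)
        simp [hc'] at this


lemma pvCellP_iff (board : List (List Int)) (player a b : Int) :
    pvCellP board player a b = true ↔
      (out_of_bound board a b = false ∧ pvCell board a b = player) := by
  rw [← pvCellB_eq]
  simp

lemma pvLegalA_eq (board : List (List Int)) (player x dy dx : Int) (c : Int → Int → Int)
    (hstep : ∀ i j, c (i + dy) (j + dx) = c i j + 1)
    (hlt : ∀ i j, pvCellP board player i j = true → c i j < (board.length : Int))
    (hge : ∀ i j, pvCellP board player i j = true → 0 ≤ c i j)
    (hx : 0 ≤ x) (i j : Int) (hcell : pvCellP board player i j = true) :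
    pvLegalA board player x dy dx i j = decide ((pvRay board player dy dx i j : Int) = x) := by
  have key : pvLegalA board player x dy dx i j =
      (if out_of_bound board (i + dy * x) (j + dx * x) = false ∧
          pvCell board (i + dy * x) (j + dx * x) = player then false
       else true && (PySem.List.pyRange 1 x 1).all
          (fun x_ => pvCellP board player (i + dy * x_) (j + dx * x_))) := by
    rw [pvLegalA]
    rw [pvLoop_snd board player dy dx i j (PySem.List.pyRange 1 x 1) true]
  have hbridge : (∀ x_ : Int, 1 ≤ x_ → x_ < x →
        pvCellP board player (i + dy * x_) (j + dx * x_) = true) ↔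
      (∀ k : Nat, k < x.toNat → pvCellP board player (i + dy * (k : Int)) (j + dx * (k : Int)) = true) := by
    constructor
    · intro h k hk
      rcases Nat.eq_zero_or_pos k with h0 | h0
      · subst h0; simpa using hcell
      · exact h (k : Int) (by omega) (by omega)
    · intro h x_ h1 h2
      have := h x_.toNat (by omega)
      rwa [Int.toNat_of_nonneg (by omega)] at this
  have hall : ((PySem.List.pyRange 1 x 1).all
        (fun x_ => pvCellP board player (i + dy * x_) (j + dx * x_)) = true) ↔
      (x.toNat ≤ pvRay board player dy dx i j) := by
    rw [List.all_eq_true]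
    rw [pvRay_ge_iff board player dy dx c hstep hlt hge x.toNat i j]
    rw [← hbridge]
    constructor
    · intro h x_ h1 h2
      exact h x_ (by rw [PySem.List.mem_pyRange_one]; omega)
    · intro h x_ hm
      rw [PySem.List.mem_pyRange_one] at hm
      exact h x_ hm.1 hm.2
  have hsucc : (x.toNat + 1 ≤ pvRay board player dy dx i j) ↔
      ((x.toNat ≤ pvRay board player dy dx i j) ∧
        pvCellP board player (i + dy * x) (j + dx * x) = true) := by
    rw [pvRay_ge_iff board player dy dx c hstep hlt hge (x.toNat + 1) i j,
        pvRay_ge_iff board player dy dx c hstep hlt hge x.toNat i j]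
    constructor
    · intro h
      refine ⟨fun k hk => h k (by omega), ?_⟩
      have := h x.toNat (by omega)
      rwa [Int.toNat_of_nonneg hx] at this
    · rintro ⟨h1, h2⟩ k hk
      rcases Nat.lt_or_ge k x.toNat with hlt' | hge'
      · exact h1 k hlt'
      · have hkx : (k : Int) = x := by omega
        rwa [hkx]
  rw [key]
  by_cases hB : pvCellP board player (i + dy * x) (j + dx * x) = true
  · rw [if_pos ((pvCellP_iff board player _ _).mp hB)]
    by_cases hA : x.toNat ≤ pvRay board player dy dx i j
    · have : x.toNat + 1 ≤ pvRay board player dy dx i j := hsucc.mpr ⟨hA, hB⟩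
      refine (decide_eq_false ?_).symm
      omega
    · refine (decide_eq_false ?_).symm
      omega
  · have hcond : ¬ (out_of_bound board (i + dy * x) (j + dx * x) = false ∧
        pvCell board (i + dy * x) (j + dx * x) = player) := by
      rw [← pvCellP_iff]; exact hB
    rw [if_neg hcond, Bool.true_and]
    by_cases hA : x.toNat ≤ pvRay board player dy dx i j
    · have h1 : ¬ (x.toNat + 1 ≤ pvRay board player dy dx i j) := by
        intro h; exact hB (hsucc.mp h).2
      rw [hall.mpr hA]
      refine (decide_eq_true ?_).symm
      omega
    · have : ¬ ((PySem.List.pyRange 1 x 1).all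
          (fun x_ => pvCellP board player (i + dy * x_) (j + dx * x_)) = true) := fun h => hA (hall.mp h)
      rw [Bool.not_eq_true] at this
      rw [this]
      refine (decide_eq_false ?_).symm
      omega

def pvInv (board : List (List Int)) (player dy dx : Int) (d : PySem.Dict (Int × Int) Int)
    (done : Int → Int → Bool) : Prop :=
  ∀ a b : Int, d.getD (a, b) 0 =
    (if done a b && pvCellP board player a b then ((pvRay board player dy dx a b : Nat) : Int) else 0)

lemma pvInv_ext (board : List (List Int)) (player dy dx : Int) (d : PySem.Dict (Int × Int) Int)
    (done done' : Int → Int → Bool)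
    (h : ∀ a b, pvCellP board player a b = true → done a b = done' a b) :
    pvInv board player dy dx d done → pvInv board player dy dx d done' := by
  intro hInv a b
  rw [hInv a b]
  by_cases hc : pvCellP board player a b = true
  · rw [h a b hc]
  · have hc' : pvCellP board player a b = false := by simpa using hc
    simp [hc']

lemma pvRay_zero_of_not_cellP (board : List (List Int)) (player dy dx a b : Int)
    (h : pvCellP board player a b = false) : pvRay board player dy dx a b = 0 := by
  simp [pvRay, pvRayF, h]

lemma pvStep_inv (board : List (List Int)) (player dy dx : Int) (c : Int → Int → Int)
    (hstep : ∀ i j, c (i + dy) (j + dx) = c i j + 1)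
    (hlt : ∀ i j, pvCellP board player i j = true → c i j < (board.length : Int))
    (hge : ∀ i j, pvCellP board player i j = true → 0 ≤ c i j)
    (done done' : Int → Int → Bool) (d : PySem.Dict (Int × Int) Int) (i m : Int)
    (hib : 0 ≤ i ∧ i < (board.length : Int) ∧ 0 ≤ m ∧ m < (board.length : Int))
    (hnext : pvCellP board player (i + dy) (m + dx) = true → done (i + dy) (m + dx) = true)
    (hd' : ∀ a b, ¬(a = i ∧ b = m) → done' a b = done a b)
    (hd'm : done' i m = true)
    (hInv : pvInv board player dy dx d done) :
    pvInv board player dy dx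
      (if pvCell board i m = player then d.insert (i, m) (1 + d.getD (i + dy, m + dx) 0) else d)
      done' := by
  by_cases hpl : pvCell board i m = player
  · rw [if_pos hpl]
    have hcp : pvCellP board player i m = true := by
      simp only [pvCellP, Bool.and_eq_true, decide_eq_true_eq]
      exact ⟨hib, hpl⟩
    have hval : d.getD (i + dy, m + dx) 0 = ((pvRay board player dy dx (i + dy) (m + dx) : Nat) : Int) := by
      rw [hInv (i + dy) (m + dx)]
      by_cases hcn : pvCellP board player (i + dy) (m + dx) = true
      · rw [hnext hcn, hcn]; simp
      · have hcn' : pvCellP board player (i + dy) (m + dx) = false := by simpa using hcn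
        rw [pvRay_zero_of_not_cellP board player dy dx _ _ hcn']
        simp [hcn']
    intro a b
    rw [PySem.Dict.getD_insert]
    by_cases hab : (a, b) = ((i, m) : Int × Int)
    · rw [if_pos hab]
      have ha : a = i := (Prod.mk.injEq _ _ _ _ ▸ hab : _ ∧ _).1
      have hb : b = m := (Prod.mk.injEq _ _ _ _ ▸ hab : _ ∧ _).2
      subst ha; subst hb
      have hray := pvRay_succ board player dy dx c hstep hlt hge a b
      rw [hval, hd'm, hcp, Bool.true_and, if_pos rfl, hray, if_pos hcp]
      push_cast
      ring
    · rw [if_neg hab]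
      rw [hInv a b]
      have : done' a b = done a b := by
        apply hd'
        intro ⟨h1, h2⟩
        exact hab (by rw [h1, h2])
      rw [this]
  · rw [if_neg hpl]
    intro a b
    rw [hInv a b]
    by_cases hab : a = i ∧ b = m
    · obtain ⟨h1, h2⟩ := hab
      subst h1; subst h2
      have hcp : pvCellP board player a b = false := by
        simp only [pvCellP, Bool.and_eq_true, decide_eq_true_eq]
        simp [hpl]
      simp [hcp]
    · rw [hd' a b hab]

lemma pvInnerDesc (board : List (List Int)) (player dy dx : Int) (c : Int → Int → Int)
    (hstep : ∀ i j, c (i + dy) (j + dx) = c i j + 1)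
    (hlt : ∀ i j, pvCellP board player i j = true → c i j < (board.length : Int))
    (hge : ∀ i j, pvCellP board player i j = true → 0 ≤ c i j)
    (i : Int) (hi : 0 ≤ i ∧ i < (board.length : Int)) (donebase : Int → Int → Bool)
    (hnb : ∀ b : Int, pvCellP board player (i + dy) (b + dx) = true →
      donebase (i + dy) (b + dx) = true ∨ (dy = 0 ∧ dx = 1)) :
    ∀ (m : Nat), (m : Int) ≤ (board.length : Int) →
      ∀ d, pvInv board player dy dx d (fun a b => donebase a b || (a == i && decide ((m : Int) ≤ b))) →
      pvInv board player dy dx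
        (((PySem.List.pyRange 0 (m : Int) 1).reverse).foldl
          (fun run j =>
            if pvCell board i j = player then
              run.insert (i, j) (1 + run.getD (i + dy, j + dx) 0)
            else run) d)
        (fun a b => donebase a b || (a == i && decide ((0 : Int) ≤ b))) := by
  intro m
  induction m with
  | zero =>
    intro _ d hInv
    simpa [PySem.List.pyRange_one_eq_nil] using hInv
  | succ m ih =>
    intro hm d hInv
    have hrange : PySem.List.pyRange 0 ((m : Nat) + 1 : Nat) 1 =
        PySem.List.pyRange 0 (m : Int) 1 ++ [(m : Int)] := by
      push_cast
      exact PySem.List.pyRange_one_succ_right (by omega)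
    rw [hrange, List.reverse_append, List.reverse_singleton, List.singleton_append, List.foldl_cons]
    apply ih (by omega)
    apply pvStep_inv board player dy dx c hstep hlt hge
      (fun a b => donebase a b || (a == i && decide ((m : Int) + 1 ≤ b))) _ d i (m : Int)
      ⟨hi.1, hi.2, by omega, by omega⟩
    · intro hcn
      rcases hnb (m : Int) hcn with h | ⟨h0, h1⟩
      · simp [h]
      · subst h0; subst h1
        simp
    · intro a b hab
      by_cases h1 : a = i
      · subst h1
        have hbm : b ≠ (m : Int) := fun h => hab ⟨rfl, h⟩
        have hiff : ((m : Int) ≤ b) ↔ ((m : Int) + 1 ≤ b) := by omega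
        rw [decide_eq_decide.mpr hiff]
      · have h1' : (a == i) = false := by simpa using h1
        simp [h1']
    · simp
    · apply pvInv_ext board player dy dx d _ _ _ hInv
      intro a b _
      have hiff : ((((m : Nat) + 1 : Nat) : Int) ≤ b) ↔ ((m : Int) + 1 ≤ b) := by omega
      rw [decide_eq_decide.mpr hiff]

lemma pvInnerAsc (board : List (List Int)) (player dy dx : Int) (c : Int → Int → Int)
    (hstep : ∀ i j, c (i + dy) (j + dx) = c i j + 1)
    (hlt : ∀ i j, pvCellP board player i j = true → c i j < (board.length : Int))
    (hge : ∀ i j, pvCellP board player i j = true → 0 ≤ c i j)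
    (i : Int) (hi : 0 ≤ i ∧ i < (board.length : Int)) (donebase : Int → Int → Bool)
    (hnb : ∀ b : Int, pvCellP board player (i + dy) (b + dx) = true →
      donebase (i + dy) (b + dx) = true) :
    ∀ (m : Nat) (k : Int), k = (board.length : Int) - (m : Int) → 0 ≤ k →
      ∀ d, pvInv board player dy dx d (fun a b => donebase a b || (a == i && decide (b < k))) →
      pvInv board player dy dx
        ((PySem.List.pyRange k (board.length : Int) 1).foldl
          (fun run j =>
            if pvCell board i j = player then
              run.insert (i, j) (1 + run.getD (i + dy, j + dx) 0)
            else run) d)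
        (fun a b => donebase a b || (a == i && decide (b < (board.length : Int)))) := by
  intro m
  induction m with
  | zero =>
    intro k hk hk0 d hInv
    have : k = (board.length : Int) := by omega
    subst this
    simpa [PySem.List.pyRange_one_eq_nil] using hInv
  | succ m ih =>
    intro k hk hk0 d hInv
    have hkn : k < (board.length : Int) := by omega
    rw [PySem.List.pyRange_one_cons hkn, List.foldl_cons]
    apply ih (k + 1) (by omega) (by omega)
    apply pvStep_inv board player dy dx c hstep hlt hge
      (fun a b => donebase a b || (a == i && decide (b < k))) _ d i k
      ⟨hi.1, hi.2, by omega, by omega⟩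
    · intro hcn
      simp [hnb k hcn]
    · intro a b hab
      by_cases h1 : a = i
      · subst h1
        have hbm : b ≠ k := fun h => hab ⟨rfl, h⟩
        have hiff : (b < k + 1) ↔ (b < k) := by omega
        rw [decide_eq_decide.mpr hiff]
      · have h1' : (a == i) = false := by simpa using h1
        simp [h1']
    · simp
    · exact hInv

lemma pvOuter (board : List (List Int)) (player dy dx : Int)
    (jl : List Int)
    (hinner : ∀ (i : Int) (donebase : Int → Int → Bool) (d : PySem.Dict (Int × Int) Int),
      0 ≤ i → i < (board.length : Int) →
      (∀ b : Int, pvCellP board player (i + dy) (b + dx) = true →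
        donebase (i + dy) (b + dx) = true ∨ (dy = 0 ∧ dx = 1)) →
      pvInv board player dy dx d donebase →
      pvInv board player dy dx
        (jl.foldl (fun run j =>
          if pvCell board i j = player then
            run.insert (i, j) (1 + run.getD (i + dy, j + dx) 0)
          else run) d)
        (fun a b => donebase a b || (a == i)))
    (hdir : dy = 1 ∨ (dy = 0 ∧ dx = 1)) :
    ∀ (m : Nat), (m : Int) ≤ (board.length : Int) →
      ∀ d, pvInv board player dy dx d (fun a b => decide ((m : Int) ≤ a)) →
      pvInv board player dy dx
        (((PySem.List.pyRange 0 (m : Int) 1).reverse).foldl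
          (fun run i => jl.foldl (fun run j =>
            if pvCell board i j = player then
              run.insert (i, j) (1 + run.getD (i + dy, j + dx) 0)
            else run) run) d)
        (fun a b => decide ((0 : Int) ≤ a)) := by
  intro m
  induction m with
  | zero =>
    intro _ d hInv
    simpa [PySem.List.pyRange_one_eq_nil] using hInv
  | succ m ih =>
    intro hm d hInv
    have hrange : PySem.List.pyRange 0 ((m : Nat) + 1 : Nat) 1 =
        PySem.List.pyRange 0 (m : Int) 1 ++ [(m : Int)] := by
      push_cast
      exact PySem.List.pyRange_one_succ_right (by omega)
    rw [hrange, List.reverse_append, List.reverse_singleton, List.singleton_append, List.foldl_cons]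
    apply ih (by omega)
    have step := hinner (m : Int) (fun a b => decide ((m : Int) + 1 ≤ a)) d (by omega) (by omega)
      (by
        intro b hcn
        rcases hdir with h | ⟨h0, h1⟩
        · left; subst h; simp
        · right; exact ⟨h0, h1⟩)
      (by
        apply pvInv_ext board player dy dx d _ _ _ hInv
        intro a b _
        have hiff : ((((m : Nat) + 1 : Nat) : Int) ≤ a) ↔ ((m : Int) + 1 ≤ a) := by omega
        rw [decide_eq_decide.mpr hiff])
    apply pvInv_ext board player dy dx _ _ _ _ step
    intro a b hc
    have ha : 0 ≤ a := by
      simp only [pvCellP, Bool.and_eq_true, decide_eq_true_eq] at hc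
      exact hc.1.1
    by_cases h1 : a = (m : Int)
    · subst h1
      simp
    · have h1' : (a == (m : Int)) = false := by simpa using h1
      rw [h1']
      have hiff : ((m : Int) + 1 ≤ a) ↔ ((m : Int) ≤ a) := by omega
      simp only [Bool.or_false]
      rw [decide_eq_decide.mpr hiff]

lemma pvEmpty_inv (board : List (List Int)) (player dy dx : Int) :
    pvInv board player dy dx PySem.Dict.empty
      (fun a b => decide (((board.length : Nat) : Int) ≤ a)) := by
  intro a b
  rw [PySem.Dict.getD_empty]
  by_cases hc : pvCellP board player a b = true
  · have : a < (board.length : Int) := by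
      simp only [pvCellP, Bool.and_eq_true, decide_eq_true_eq] at hc
      exact hc.1.2.1
    have hd : (decide (((board.length : Nat) : Int) ≤ a)) = false := decide_eq_false (by omega)
    simp [hd]
  · have hc' : pvCellP board player a b = false := by simpa using hc
    simp [hc']

def pvBuild (board : List (List Int)) (player dy dx : Int) (jl : List Int) : PySem.Dict (Int × Int) Int :=
  ((PySem.List.pyRange 0 (board.length : Int) 1).reverse).foldl
    (fun run i => jl.foldl (fun run j =>
      if pvCell board i j = player then
        run.insert (i, j) (1 + run.getD (i + dy, j + dx) 0)
      else run) run) PySem.Dict.empty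

lemma pvCellP_bounds (board : List (List Int)) (player i j : Int)
    (h : pvCellP board player i j = true) :
    0 ≤ i ∧ i < (board.length : Int) ∧ 0 ≤ j ∧ j < (board.length : Int) ∧ pvCell board i j = player := by
  simp only [pvCellP, Bool.and_eq_true, decide_eq_true_eq] at h
  exact ⟨h.1.1, h.1.2.1, h.1.2.2.1, h.1.2.2.2, h.2⟩

-- final dict characterization, for either traversal order of the columns
lemma pvBuild_getD (board : List (List Int)) (player dy dx : Int) (c : Int → Int → Int)
    (hstep : ∀ i j, c (i + dy) (j + dx) = c i j + 1)
    (hlt : ∀ i j, pvCellP board player i j = true → c i j < (board.length : Int))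
    (hge : ∀ i j, pvCellP board player i j = true → 0 ≤ c i j)
    (hdir : dy = 1 ∨ (dy = 0 ∧ dx = 1)) (jl : List Int)
    (hjl : (dx < 0 ∧ jl = PySem.List.pyRange 0 (board.length : Int) 1) ∨
           (0 ≤ dx ∧ jl = (PySem.List.pyRange 0 (board.length : Int) 1).reverse))
    (i j : Int) (hc : pvCellP board player i j = true) :
    (pvBuild board player dy dx jl).getD (i, j) 0 = ((pvRay board player dy dx i j : Nat) : Int) := by
  have hinner : ∀ (i : Int) (donebase : Int → Int → Bool) (d : PySem.Dict (Int × Int) Int),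
      0 ≤ i → i < (board.length : Int) →
      (∀ b : Int, pvCellP board player (i + dy) (b + dx) = true →
        donebase (i + dy) (b + dx) = true ∨ (dy = 0 ∧ dx = 1)) →
      pvInv board player dy dx d donebase →
      pvInv board player dy dx
        (jl.foldl (fun run j =>
          if pvCell board i j = player then
            run.insert (i, j) (1 + run.getD (i + dy, j + dx) 0)
          else run) d)
        (fun a b => donebase a b || (a == i)) := by
    rcases hjl with ⟨hdx, hjl⟩ | ⟨hdx, hjl⟩
    · -- ascending columns: only used for dy = 1
      have hdy : dy = 1 := by rcases hdir with h | ⟨_, h1⟩; exact h; omega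
      intro i0 donebase d h0 h1 hnb hInv
      subst hjl
      have hnb' : ∀ b : Int, pvCellP board player (i0 + dy) (b + dx) = true →
          donebase (i0 + dy) (b + dx) = true := by
        intro b hb
        rcases hnb b hb with h | ⟨h2, _⟩
        · exact h
        · omega
      have := pvInnerAsc board player dy dx c hstep hlt hge i0 ⟨h0, h1⟩ donebase hnb'
        board.length 0 (by omega) (by omega) d
        (by
          apply pvInv_ext board player dy dx d _ _ _ hInv
          intro a b hcb
          obtain ⟨_, _, hb0, _, _⟩ := pvCellP_bounds board player a b hcb
          have : (decide (b < (0 : Int))) = false := decide_eq_false (by omega)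
          simp [this])
      apply pvInv_ext board player dy dx _ _ _ _ this
      intro a b hcb
      obtain ⟨_, _, _, hbn, _⟩ := pvCellP_bounds board player a b hcb
      have : (decide (b < (board.length : Int))) = true := decide_eq_true (by omega)
      simp [this]
    · -- descending columns
      intro i0 donebase d h0 h1 hnb hInv
      subst hjl
      have := pvInnerDesc board player dy dx c hstep hlt hge i0 ⟨h0, h1⟩ donebase hnb
        board.length (by omega) d
        (by
          apply pvInv_ext board player dy dx d _ _ _ hInv
          intro a b hcb
          obtain ⟨_, _, _, hbn, _⟩ := pvCellP_bounds board player a b hcb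
          have : (decide (((board.length : Nat) : Int) ≤ b)) = false := decide_eq_false (by omega)
          simp [this])
      apply pvInv_ext board player dy dx _ _ _ _ this
      intro a b hcb
      obtain ⟨_, _, hb0, _, _⟩ := pvCellP_bounds board player a b hcb
      have : (decide ((0 : Int) ≤ b)) = true := decide_eq_true (by omega)
      simp [this]
  have houter := pvOuter board player dy dx jl hinner hdir board.length (by omega)
    PySem.Dict.empty (pvEmpty_inv board player dy dx)
  obtain ⟨hi0, _, _, _, _⟩ := pvCellP_bounds board player i j hc
  rw [pvBuild]
  rw [houter i j]
  have : (decide ((0 : Int) ≤ i)) = true := decide_eq_true hi0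
  simp [this, hc]

def pvT (board : List (List Int)) (player x i j dy dx : Int) : Int :=
  if out_of_bound board (i - dy) (j - dx) = false ∧ pvCell board (i - dy) (j - dx) = player then 0
  else if pvLegalA board player x dy dx i j then 1 else 0

lemma pvCellTerm (board : List (List Int)) (player x dy dx : Int) (c : Int → Int → Int)
    (hstep : ∀ i j, c (i + dy) (j + dx) = c i j + 1)
    (hlt : ∀ i j, pvCellP board player i j = true → c i j < (board.length : Int))
    (hge : ∀ i j, pvCellP board player i j = true → 0 ≤ c i j)
    (hx : 0 ≤ x) (i j : Int)
    (hij : 0 ≤ i ∧ i < (board.length : Int) ∧ 0 ≤ j ∧ j < (board.length : Int))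
    (rv : Int) (hrv : pvCellP board player i j = true → rv = ((pvRay board player dy dx i j : Nat) : Int)) :
    (if pvCell board i j = player ∧ rv = x ∧
        ¬ (0 ≤ i - dy ∧ i - dy < (board.length : Int) ∧ 0 ≤ j - dx ∧ j - dx < (board.length : Int) ∧
           pvCell board (i - dy) (j - dx) = player)
     then 1 else 0) =
    (if pvCell board i j = player then pvT board player x i j dy dx else 0) := by
  by_cases hp : pvCell board i j = player
  · have hcp : pvCellP board player i j = true := by
      simp only [pvCellP, Bool.and_eq_true, decide_eq_true_eq]
      exact ⟨hij, hp⟩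
    rw [hrv hcp, if_pos hp, pvT]
    have hpred : (out_of_bound board (i - dy) (j - dx) = false ∧ pvCell board (i - dy) (j - dx) = player) ↔
        (0 ≤ i - dy ∧ i - dy < (board.length : Int) ∧ 0 ≤ j - dx ∧ j - dx < (board.length : Int) ∧
         pvCell board (i - dy) (j - dx) = player) := by
      rw [pvOob_false_iff]
      tauto
    by_cases hq : (0 ≤ i - dy ∧ i - dy < (board.length : Int) ∧ 0 ≤ j - dx ∧ j - dx < (board.length : Int) ∧
        pvCell board (i - dy) (j - dx) = player)
    · rw [if_pos (hpred.mpr hq), if_neg (by tauto)]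
    · rw [if_neg (fun h => hq (hpred.mp h))]
      rw [pvLegalA_eq board player x dy dx c hstep hlt hge hx i j hcp]
      by_cases hr : ((pvRay board player dy dx i j : Nat) : Int) = x
      · rw [if_pos (by tauto)]
        simp [hr]
      · rw [if_neg (by tauto)]
        simp [hr]
  · rw [if_neg (by tauto), if_neg hp]

lemma pvIte_push_else (c : Prop) [Decidable c] (cnt e : Int) :
    (if c then cnt else cnt + e) = cnt + (if c then 0 else e) := by
  split_ifs <;> ring

lemma pvIte_push_then (c : Prop) [Decidable c] (cnt e : Int) :
    (if c then cnt + e else cnt) = cnt + (if c then e else 0) := by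
  split_ifs <;> ring

lemma pvT_fold (board : List (List Int)) (player x i j dy dx : Int) :
    (if out_of_bound board (i - dy) (j - dx) = false ∧ pvCell board (i - dy) (j - dx) = player then 0
     else if pvLegalA board player x dy dx i j then 1 else 0) = pvT board player x i j dy dx := rfl

lemma pvChain (p : Prop) [Decidable p] (cnt a b c d : Int) :
    (if p then cnt + a + b + c + d else cnt) = cnt + (if p then a + (b + (c + d)) else 0) := by
  split_ifs <;> ring


lemma pvAexpand (board : List (List Int)) (player x : Int) :
    count_continuous_x board player x =
    ((PySem.List.pyRange 0 (board.length : Int) 1).map (fun i =>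
      ((PySem.List.pyRange 0 (board.length : Int) 1).map (fun j =>
        if pvCell board i j = player then
          pvT board player x i j 0 1 + (pvT board player x i j 1 1 +
            (pvT board player x i j 1 0 + pvT board player x i j 1 (-1)))
        else 0)).sum)).sum := by
  simp only [count_continuous_x, List.foldl_cons, List.foldl_nil, pvIte_push_else, pvT_fold,
    pvChain, PySem.List.foldl_add, zero_add]

def pvBSum (board : List (List Int)) (player x dy dx : Int) (jl : List Int) : Int :=
  ((PySem.List.pyRange 0 (board.length : Int) 1).map (fun i =>
    ((PySem.List.pyRange 0 (board.length : Int) 1).map (fun j =>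
      if pvCell board i j = player ∧ (pvBuild board player dy dx jl).getD (i, j) 0 = x ∧
          ¬ (0 ≤ i - dy ∧ i - dy < (board.length : Int) ∧ 0 ≤ j - dx ∧ j - dx < (board.length : Int) ∧
             pvCell board (i - dy) (j - dx) = player)
      then 1 else 0)).sum)).sum

lemma pvBuild_fold (board : List (List Int)) (player dy dx : Int) (jl : List Int) :
    (((PySem.List.pyRange 0 (board.length : Int) 1).reverse).foldl
      (fun run i => jl.foldl (fun run j =>
        if pvCell board i j = player then
          run.insert (i, j) (1 + run.getD (i + dy, j + dx) 0)
        else run) run) PySem.Dict.empty) = pvBuild board player dy dx jl := rfl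

lemma pvBexpand (board : List (List Int)) (player x : Int) :
    count_continuous_x_alt board player x =
    pvBSum board player x 0 1 ((PySem.List.pyRange 0 (board.length : Int) 1).reverse) +
    pvBSum board player x 1 1 ((PySem.List.pyRange 0 (board.length : Int) 1).reverse) +
    pvBSum board player x 1 0 ((PySem.List.pyRange 0 (board.length : Int) 1).reverse) +
    pvBSum board player x 1 (-1) (PySem.List.pyRange 0 (board.length : Int) 1) := by
  have c1 : ¬((1 : Int) < 0) := by norm_num
  have c0 : ¬((0 : Int) < 0) := by norm_num
  have cm : ((-1 : Int) < 0) := by norm_num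
  simp only [count_continuous_x_alt, List.foldl_cons, List.foldl_nil, if_neg c1, if_neg c0,
    if_pos cm, pvBuild_fold, pvIte_push_then, PySem.List.foldl_add, zero_add, pvBSum]

lemma pvBSum_eq (board : List (List Int)) (player x dy dx : Int) (c : Int → Int → Int)
    (hstep : ∀ i j, c (i + dy) (j + dx) = c i j + 1)
    (hlt : ∀ i j, pvCellP board player i j = true → c i j < (board.length : Int))
    (hge : ∀ i j, pvCellP board player i j = true → 0 ≤ c i j)
    (hdir : dy = 1 ∨ (dy = 0 ∧ dx = 1)) (jl : List Int)
    (hjl : (dx < 0 ∧ jl = PySem.List.pyRange 0 (board.length : Int) 1) ∨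
           (0 ≤ dx ∧ jl = (PySem.List.pyRange 0 (board.length : Int) 1).reverse))
    (hx : 0 ≤ x) :
    pvBSum board player x dy dx jl =
    ((PySem.List.pyRange 0 (board.length : Int) 1).map (fun i =>
      ((PySem.List.pyRange 0 (board.length : Int) 1).map (fun j =>
        if pvCell board i j = player then pvT board player x i j dy dx else 0)).sum)).sum := by
  rw [pvBSum]
  apply congrArg List.sum
  apply List.map_congr_left
  intro i hi
  apply congrArg List.sum
  apply List.map_congr_left
  intro j hj
  rw [PySem.List.mem_pyRange_one] at hi hj
  exact pvCellTerm board player x dy dx c hstep hlt hge hx i j ⟨hi.1, hi.2, hj.1, hj.2⟩ _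
    (fun hc => pvBuild_getD board player dy dx c hstep hlt hge hdir jl hjl i j hc)

lemma pvIte_add_split (p : Prop) [Decidable p] (a b c d : Int) :
    (if p then a + (b + (c + d)) else 0) =
    (if p then a else 0) + ((if p then b else 0) + ((if p then c else 0) + (if p then d else 0))) := by
  split_ifs <;> ring

theorem pv_main (board : List (List Int)) (player x : Int) (hx : 0 ≤ x) :
    count_continuous_x board player x = count_continuous_x_alt board player x := by
  rw [pvAexpand, pvBexpand]
  rw [pvBSum_eq board player x 0 1 (fun _ j => j)
        (by intro i j; rfl)
        (by intro i j h; exact (pvCellP_bounds board player i j h).2.2.2.1)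
        (by intro i j h; exact (pvCellP_bounds board player i j h).2.2.1)
        (Or.inr ⟨rfl, rfl⟩) _ (Or.inr ⟨by norm_num, rfl⟩) hx]
  rw [pvBSum_eq board player x 1 1 (fun i _ => i)
        (by intro i j; rfl)
        (by intro i j h; exact (pvCellP_bounds board player i j h).2.1)
        (by intro i j h; exact (pvCellP_bounds board player i j h).1)
        (Or.inl rfl) _ (Or.inr ⟨by norm_num, rfl⟩) hx]
  rw [pvBSum_eq board player x 1 0 (fun i _ => i)
        (by intro i j; rfl)
        (by intro i j h; exact (pvCellP_bounds board player i j h).2.1)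
        (by intro i j h; exact (pvCellP_bounds board player i j h).1)
        (Or.inl rfl) _ (Or.inr ⟨by norm_num, rfl⟩) hx]
  rw [pvBSum_eq board player x 1 (-1) (fun i _ => i)
        (by intro i j; rfl)
        (by intro i j h; exact (pvCellP_bounds board player i j h).2.1)
        (by intro i j h; exact (pvCellP_bounds board player i j h).1)
        (Or.inl rfl) _ (Or.inl ⟨by norm_num, rfl⟩) hx]
  simp only [pvIte_add_split, PySem.List.sum_map_add_int]
  ring

-- ===== VERDICT (by name: the statement is the Claim_ definition above) =====
theorem count_continuous_x_spec : Claim_equal_count_continuous_x := by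
  intro board player x _ hpre
  exact pv_main board player x hpre.2
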